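-- pv_equiv track=rewrite | github.com/TheUnlocked/DiscordBot.py-API | Events/Commands/CommandRandom.py | valid_usage
-- ===== SOURCE A (Python) =====
-- def is_int(s):
--     try:
--         int(s)
--         return True
--     except ValueError:
--         return False
--
-- def valid_usage(args: []):
--     num_args = 0
--     for arg in args:
--         if is_int(arg):
--             num_args += 1
--         else:
--             num_args = 3
--     return num_args == 1 or (num_args == 2 and int(args[0]) < int(args[1]))
-- ===== SOURCE B (Python) =====
-- def is_int(s):
--     try:
--         int(s)
--         return True
--     except ValueError:
--         return False
--
-- def valid_usage(args: []):
--     if not all(is_int(a) for a in args):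
--         return False
--     if len(args) == 1:
--         return True
--     if len(args) == 2:
--         return int(args[0]) < int(args[1])
--     return False
-- ===== Notes on version B (the rewrite author's own statement) =====
-- stated objective: simpler
-- what changed: Replaces the counter-with-sentinel-reset loop (num_args set to 3 on any non-int) by an explicit 'all ints' check followed by a branch on the list length, exploiting that the sentinel makes any non-int input invalid.
import Mathlib
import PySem

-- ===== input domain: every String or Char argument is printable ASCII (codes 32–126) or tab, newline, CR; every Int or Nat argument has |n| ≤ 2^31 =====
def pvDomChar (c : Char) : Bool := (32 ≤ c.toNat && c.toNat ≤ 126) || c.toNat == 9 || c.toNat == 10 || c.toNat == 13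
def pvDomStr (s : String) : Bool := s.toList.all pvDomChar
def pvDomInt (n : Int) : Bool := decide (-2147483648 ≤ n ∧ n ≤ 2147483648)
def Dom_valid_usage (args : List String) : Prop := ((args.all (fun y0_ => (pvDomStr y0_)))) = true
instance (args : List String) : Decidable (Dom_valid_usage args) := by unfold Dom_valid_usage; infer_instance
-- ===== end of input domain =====

-- B replaces A's counter-with-sentinel loop by an 'all ints' check plus a branch on the length (objective: simpler).

-- ===== PORT A =====
-- is_int(s): int(s) succeeds iff ofStr? returns some (the only exception is ValueError, caught)
def is_int (s : String) : Bool := (PySem.Int.ofStr? s).isSome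

-- int(args[i]) on the final line: only evaluated (short-circuit) when num_args == 2,
-- which forces args = two int-like strings, so the .getD 0 defaults are never used (exact there).
def valid_usage (args : List String) : Bool :=
  let num_args : Int := args.foldl (fun n arg => if is_int arg then n + 1 else 3) 0
  num_args == 1 ||
    (num_args == 2 &&
      decide (((PySem.List.pyGet? args 0).bind PySem.Int.ofStr?).getD 0
            < ((PySem.List.pyGet? args 1).bind PySem.Int.ofStr?).getD 0))

-- ===== PORT B =====
def valid_usage_alt (args : List String) : Bool :=
  if args.all (fun a => is_int a) then
    match args with
    | [_] => true
    | [a, b] => decide ((PySem.Int.ofStr? a).getD 0 < (PySem.Int.ofStr? b).getD 0)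
    | _ => false
  else false

-- ===== PRECONDITION & SPEC =====
def Spec_valid_usage (args : List String) (out : Bool) : Prop := out = valid_usage_alt args
instance (args : List String) (out : Bool) : Decidable (Spec_valid_usage args out) := by unfold Spec_valid_usage; infer_instance

-- ===== CLAIM (what is proved, stated in full; the proofs are below) =====
def Claim_equal_valid_usage : Prop := ∀ (args : List String), Dom_valid_usage args → Spec_valid_usage args (valid_usage args)

-- ===== LEMMAS AND PROOFS =====

-- If every element is int-like, A's fold just counts: result = n + length.
theorem pv_fold_all_int (args : List String) (n : Int)
    (h : ∀ a ∈ args, is_int a = true) :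
    args.foldl (fun n arg => if is_int arg then n + 1 else 3) n = n + args.length := by
  induction args generalizing n with
  | nil => simp
  | cons a t ih =>
    have ha : is_int a = true := h a (by simp)
    simp only [List.foldl_cons, ha, if_pos]
    rw [ih (n + 1) (fun x hx => h x (List.mem_cons_of_mem a hx))]
    simp; omega

-- Once the accumulator is ≥ 3 it stays ≥ 3.
theorem pv_fold_ge (args : List String) (n : Int) (h : 3 ≤ n) :
    3 ≤ args.foldl (fun n arg => if is_int arg then n + 1 else 3) n := by
  induction args generalizing n with
  | nil => simpa
  | cons a t ih =>
    simp only [List.foldl_cons]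
    split
    · exact ih (n + 1) (by omega)
    · exact ih 3 (by omega)

-- Any non-int element forces the final accumulator ≥ 3.
theorem pv_fold_bad (args : List String) (n : Int)
    (h : ∃ a ∈ args, is_int a = false) :
    3 ≤ args.foldl (fun n arg => if is_int arg then n + 1 else 3) n := by
  induction args generalizing n with
  | nil => simp at h
  | cons a t ih =>
    simp only [List.foldl_cons]
    by_cases ha : is_int a = true
    · rw [if_pos ha]
      apply ih
      rcases h with ⟨x, hx, hxf⟩
      rcases List.mem_cons.mp hx with hx' | hx'
      · subst hx'; rw [ha] at hxf; cases hxf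
      · exact ⟨x, hx', hxf⟩
    · rw [if_neg ha]
      exact pv_fold_ge t 3 le_rfl

-- ===== VERDICT (by name: the statement is the Claim_ definition above) =====
theorem valid_usage_spec : Claim_equal_valid_usage := by
  intro args _
  unfold Spec_valid_usage valid_usage valid_usage_alt
  by_cases hall : ∀ a ∈ args, is_int a = true
  · have hfold := pv_fold_all_int args 0 hall
    rw [if_pos (by simpa [List.all_eq_true] using hall)]
    match args with
    | [] => simp
    | [a] =>
      have ha : is_int a = true := hall a (by simp)
      simp [ha]
    | [a, b] =>
      have ha : is_int a = true := hall a (by simp)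
      have hb : is_int b = true := hall b (by simp)
      rcases Option.isSome_iff_exists.mp (by simpa [is_int] using ha) with ⟨x, hx⟩
      rcases Option.isSome_iff_exists.mp (by simpa [is_int] using hb) with ⟨y, hy⟩
      simp [ha, hb, PySem.List.pyGet?, PySem.List.pyIdx?, hx, hy]
    | a :: b :: c :: t =>
      simp only [hfold]
      simp
      exact ⟨by omega, fun h => absurd h (by omega)⟩
  · push Not at hall
    have hbad : ∃ a ∈ args, is_int a = false := by
      rcases hall with ⟨x, hx, hxf⟩
      exact ⟨x, hx, by simpa using hxf⟩
    have hfold := pv_fold_bad args 0 hbad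
    rw [if_neg (by simp [List.all_eq_true]; rcases hbad with ⟨x, hx, hxf⟩; exact ⟨x, hx, by simpa using hxf⟩)]
    simp
    exact ⟨by omega, fun h => absurd h (by omega)⟩
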